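-- pv_equiv track=rewrite | github.com/haesookimDev/cot-agent-system | src/cot_agent_system/cot_engine.py | _extract_todo_content
-- ===== SOURCE A (Python) =====
-- def _extract_todo_content(reasoning: str) -> str:
--     """Extract actionable todo content from reasoning text"""
--     # This is a simplified extraction - in practice, you might use more sophisticated NLP
--     lines = reasoning.split('\n')
--     for line in lines:
--         line = line.strip()
--         if any(keyword in line.lower() for keyword in ['todo:', 'action:', 'task:', 'do:', 'create:', 'implement:']):
--             return line
--
--     # If no explicit todo found, use the first meaningful line
--     for line in lines:
--         line = line.strip()
--         if len(line) > 10 and not line.startswith('#'):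
--             return line
--
--     return reasoning[:100] + "..." if len(reasoning) > 100 else reasoning
-- ===== SOURCE B (Python) =====
-- def _extract_todo_content(reasoning: str) -> str:
--     """Extract actionable todo content (single fold over pre-stripped lines)."""
--     hit = cand = None
--     for line in (raw.strip() for raw in reasoning.split('\n')):
--         if hit is not None:
--             continue
--         if any(k in line.lower() for k in ('todo:', 'action:', 'task:', 'do:', 'create:', 'implement:')):
--             hit = line
--         elif cand is None and len(line) > 10 and not line.startswith('#'):
--             cand = line
--     if hit is not None:
--         return hit
--     if cand is not None:
--         return cand
--     return reasoning[:100] + "..." if len(reasoning) > 100 else reasoning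
-- ===== Notes on version B (the rewrite author's own statement) =====
-- stated objective: alternative
-- what changed: A's two sequential early-return scans are replaced by one break-free fold over the pre-stripped lines that carries a (keyword hit, first meaningful candidate) accumulator and picks the result once after the loop.
import Mathlib
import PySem

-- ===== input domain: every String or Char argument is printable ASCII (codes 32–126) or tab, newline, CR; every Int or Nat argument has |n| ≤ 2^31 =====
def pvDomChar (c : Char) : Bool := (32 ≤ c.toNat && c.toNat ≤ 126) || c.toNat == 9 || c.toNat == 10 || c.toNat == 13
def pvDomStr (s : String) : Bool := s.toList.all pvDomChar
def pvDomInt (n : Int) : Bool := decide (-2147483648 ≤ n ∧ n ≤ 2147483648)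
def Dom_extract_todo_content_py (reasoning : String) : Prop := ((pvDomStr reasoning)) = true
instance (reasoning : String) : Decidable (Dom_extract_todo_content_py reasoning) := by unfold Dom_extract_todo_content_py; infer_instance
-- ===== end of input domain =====

-- B replaces A's two sequential early-return scans with one break-free fold over the
-- pre-stripped lines carrying a (hit, candidate) accumulator (objective: alternative).


-- ===== PORT A =====
def pvKeywords : List String := ["todo:", "action:", "task:", "do:", "create:", "implement:"]

-- A's first loop: return the first stripped line whose lowercase contains a keyword
def pvLoop1 : List String → Option String
  | [] => none
  | raw :: rest =>
    let line := PySem.Str.strip raw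
    if pvKeywords.any (fun k => PySem.Str.isIn k (PySem.Str.lower line)) then some line
    else pvLoop1 rest

-- A's second loop: return the first stripped line with len > 10 not starting with '#'
def pvLoop2 : List String → Option String
  | [] => none
  | raw :: rest =>
    let line := PySem.Str.strip raw
    if PySem.Str.len line > 10 && !(PySem.Str.startswith line "#") then some line
    else pvLoop2 rest

def extract_todo_content_py (reasoning : String) : String :=
  match pvLoop1 ((PySem.Str.split? reasoning "\n").getD []) with
  | some line => line
  | none =>
    match pvLoop2 ((PySem.Str.split? reasoning "\n").getD []) with
    | some line => line
    | none =>
      if PySem.Str.len reasoning > 100 then PySem.Str.slice reasoning none (some 100) ++ "..."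
      else reasoning

-- ===== PORT B =====
-- B's fold body: once a hit is recorded the accumulator is frozen; otherwise a keyword
-- line becomes the hit, else the first meaningful line becomes the candidate.
def pvStep (acc : Option String × Option String) (line : String) : Option String × Option String :=
  match acc with
  | (some _, _) => acc
  | (none, cand) =>
    if ["todo:", "action:", "task:", "do:", "create:", "implement:"].any
        (fun k => PySem.Str.isIn k (PySem.Str.lower line)) then (some line, cand)
    else if cand.isNone && PySem.Str.len line > 10 && !(PySem.Str.startswith line "#") then
      (none, some line)
    else acc

def extract_todo_content_py_alt (reasoning : String) : String :=
  match (((PySem.Str.split? reasoning "\n").getD []).map PySem.Str.strip).foldl pvStep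
      (none, none) with
  | (some hit, _) => hit
  | (none, some cand) => cand
  | (none, none) =>
    if PySem.Str.len reasoning > 100 then PySem.Str.slice reasoning none (some 100) ++ "..."
    else reasoning

-- ===== PRECONDITION & SPEC =====
def Spec_extract_todo_content_py (reasoning : String) (out : String) : Prop := out = extract_todo_content_py_alt reasoning
instance (reasoning : String) (out : String) : Decidable (Spec_extract_todo_content_py reasoning out) := by unfold Spec_extract_todo_content_py; infer_instance

-- ===== CLAIM =====
def Claim_equal_extract_todo_content_py : Prop := ∀ (reasoning : String), Dom_extract_todo_content_py reasoning → Spec_extract_todo_content_py reasoning (extract_todo_content_py reasoning)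

-- ===== LEMMAS AND PROOFS =====
-- combine accumulator (or candidate) into the chosen optional result
def pvPick (p : Option String × Option String) : Option String :=
  match p with
  | (some h, _) => some h
  | (none, c) => c

lemma pvStep_frozen (ls : List String) (h : String) (c : Option String) :
    ls.foldl pvStep (some h, c) = (some h, c) := by
  induction ls with
  | nil => rfl
  | cons x xs ih => simpa [pvStep] using ih

lemma pvFold_pick (ls : List String) (cand : Option String) :
    pvPick ((ls.map PySem.Str.strip).foldl pvStep (none, cand)) =
      match pvLoop1 ls with
      | some l => some l
      | none => match cand with
        | some c => some c
        | none => pvLoop2 ls := by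
  induction ls generalizing cand with
  | nil => cases cand <;> simp [pvPick, pvLoop1, pvLoop2]
  | cons raw rest ih =>
    simp only [List.map_cons, List.foldl_cons, pvLoop1, pvLoop2]
    cases hkw : (pvKeywords.any fun k => PySem.Str.isIn k (PySem.Str.lower (PySem.Str.strip raw))) with
    | true =>
      rw [pvStep, if_pos (by simpa [pvKeywords] using hkw), pvStep_frozen]
      simp [pvPick]
    | false =>
      rw [pvStep, if_neg (by simpa [pvKeywords] using hkw)]
      simp only [Bool.false_eq_true, if_false]
      cases cand with
      | some c =>
        simp only [Option.isNone_some, Bool.false_and, Bool.false_eq_true, if_false]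
        rw [ih]
      | none =>
        simp only [Option.isNone_none, Bool.true_and]
        cases hm : (decide (PySem.Str.len (PySem.Str.strip raw) > 10) && !PySem.Str.startswith (PySem.Str.strip raw) "#") with
        | true =>
          simp only [if_pos]
          rw [ih]
        | false =>
          simp only [Bool.false_eq_true, if_false]
          exact ih none

-- ===== VERDICT =====
theorem extract_todo_content_py_spec : Claim_equal_extract_todo_content_py := by
  intro reasoning _
  unfold Spec_extract_todo_content_py extract_todo_content_py extract_todo_content_py_alt
  have h := pvFold_pick ((PySem.Str.split? reasoning "\n").getD []) none
  set r := (((PySem.Str.split? reasoning "\n").getD []).map PySem.Str.strip).foldl pvStep (none, none) with hr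
  obtain ⟨o1, o2⟩ := r
  cases o1 <;> cases o2 <;>
    cases h1 : pvLoop1 ((PySem.Str.split? reasoning "\n").getD []) <;>
    cases h2 : pvLoop2 ((PySem.Str.split? reasoning "\n").getD []) <;>
    simp_all [pvPick]
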